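-- pv_equiv track=rewrite | github.com/weijia128/AERO_Agent | scripts/data_processing/parse_trajectory.py | extract_stand_runway_mapping
-- ===== SOURCE A (Python) =====
-- from typing import List, Dict, Any, Optional
-- from collections import defaultdict
--
-- def extract_stand_runway_mapping(data: List[Dict[str, Any]]) -> Dict[str, Dict[str, int]]:
--     """
--     提取机位-跑道映射关系
--
--     返回格式：
--     {
--         "506": {"05L": 15, "05R": 2},  # 506机位使用05L跑道15次，05R跑道2次
--         ...
--     }
--     """
--     mapping = defaultdict(lambda: defaultdict(int))
--
--     for record in data:
--         stand = record.get('stand')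
--         runway = record.get('runway')
--         if stand and runway:
--             mapping[stand][runway] += 1
--
--     return {k: dict(v) for k, v in mapping.items()}
-- ===== SOURCE B (Python) =====
-- def extract_stand_runway_mapping(data):
--     # Collect the valid (stand, runway) pairs once, then build the nested
--     # result by counting each pair in that list via dict comprehensions.
--     pairs = []
--     for record in data:
--         stand = record.get('stand')
--         runway = record.get('runway')
--         if stand and runway:
--             pairs.append((stand, runway))
--     return {s: {r: pairs.count((s2, r)) for s2, r in pairs if s2 == s}
--             for s, _ in pairs}
-- ===== Notes on version B (the rewrite author's own statement) =====
-- stated objective: alternative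
-- what changed: Instead of incrementing nested defaultdict counters per record, B collects the valid (stand, runway) pairs into one flat list and then builds the nested result with dict comprehensions whose values are obtained by pairs.count.
import Mathlib
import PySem

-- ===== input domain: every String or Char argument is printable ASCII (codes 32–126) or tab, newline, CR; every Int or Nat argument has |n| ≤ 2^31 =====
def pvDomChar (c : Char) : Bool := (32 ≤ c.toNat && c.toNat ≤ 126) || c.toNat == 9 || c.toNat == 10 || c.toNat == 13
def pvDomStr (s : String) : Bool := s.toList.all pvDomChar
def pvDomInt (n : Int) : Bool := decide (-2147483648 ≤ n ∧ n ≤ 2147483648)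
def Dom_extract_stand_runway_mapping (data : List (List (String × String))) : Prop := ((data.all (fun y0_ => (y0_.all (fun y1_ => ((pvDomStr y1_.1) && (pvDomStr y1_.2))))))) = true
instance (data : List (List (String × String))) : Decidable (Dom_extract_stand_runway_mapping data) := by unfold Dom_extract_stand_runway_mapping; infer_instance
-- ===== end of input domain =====

-- B replaces A's nested defaultdict increments by collecting the valid (stand, runway)
-- pairs into one flat list and rebuilding the nested counts via per-pair list.count
-- (objective: alternative decomposition, not faster).

-- ===== PORT A =====
-- literal port of A: defaultdict(lambda: defaultdict(int)); mapping[stand][runway] += 1;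
-- return {k: dict(v) for k, v in mapping.items()}
def extract_stand_runway_mapping (data : List (List (String × String))) : List (String × List (String × Int)) :=
  let mapping : PySem.Dict String (PySem.Dict String Int) :=
    data.foldl (fun mapping record =>
      match (PySem.Dict.mk record).get? "stand", (PySem.Dict.mk record).get? "runway" with
      | some stand, some runway =>
          if stand ≠ "" ∧ runway ≠ "" then
            mapping.modify stand PySem.Dict.empty (fun inner => inner.modify runway 0 (· + 1))
          else mapping
      | _, _ => mapping) PySem.Dict.empty
  mapping.items.map (fun kv => (kv.1, kv.2.items))

-- ===== PORT B =====
-- literal port of Source B: collect pairs, then nested dict comprehensions with pairs.count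
def extract_stand_runway_mapping_alt (data : List (List (String × String))) : List (String × List (String × Int)) :=
  let pairs : List (String × String) :=
    data.foldl (fun pairs record =>
      match (PySem.Dict.mk record).get? "stand" with
      | none => pairs
      | some stand =>
        match (PySem.Dict.mk record).get? "runway" with
        | none => pairs
        | some runway =>
          if stand ≠ "" ∧ runway ≠ "" then pairs ++ [(stand, runway)] else pairs) []
  let result : PySem.Dict String (PySem.Dict String Int) :=
    pairs.foldl (fun result p =>
      result.insert p.1
        ((pairs.filter (fun q => q.1 == p.1)).foldl
          (fun (inner : PySem.Dict String Int) q =>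
            inner.insert q.2 ((pairs.count (q.1, q.2) : Int))) PySem.Dict.empty))
      PySem.Dict.empty
  result.items.map (fun kv => (kv.1, kv.2.items))

-- ===== PRECONDITION & SPEC =====
def Spec_extract_stand_runway_mapping (data : List (List (String × String))) (out : List (String × List (String × Int))) : Prop := out = extract_stand_runway_mapping_alt data
instance (data : List (List (String × String))) (out : List (String × List (String × Int))) : Decidable (Spec_extract_stand_runway_mapping data out) := by unfold Spec_extract_stand_runway_mapping; infer_instance

-- ===== CLAIM (what is proved, stated in full; the proofs are below) =====
def Claim_equal_extract_stand_runway_mapping : Prop := ∀ (data : List (List (String × String))), Dom_extract_stand_runway_mapping data → Spec_extract_stand_runway_mapping data (extract_stand_runway_mapping data)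

-- ===== LEMMAS AND PROOFS =====

-- the record → optional (stand, runway) extraction both ports perform
def pvExtract (record : List (String × String)) : Option (String × String) :=
  match (PySem.Dict.mk record).get? "stand", (PySem.Dict.mk record).get? "runway" with
  | some stand, some runway => if stand ≠ "" ∧ runway ≠ "" then some (stand, runway) else none
  | _, _ => none

-- A's per-pair step
def pvStepA (m : PySem.Dict String (PySem.Dict String Int)) (p : String × String) : PySem.Dict String (PySem.Dict String Int) :=
  m.modify p.1 PySem.Dict.empty (fun inner => inner.modify p.2 0 (· + 1))

-- canonical inner items for stand s over a pair list l
def pvInner (l : List (String × String)) (s : String) : List (String × Int) :=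
  (PySem.Set.ofList ((l.filter (fun p => p.1 == s)).map Prod.snd)).map
    (fun r => (r, (l.count (s, r) : Int)))

def pvInnerD (l : List (String × String)) (s : String) : PySem.Dict String Int :=
  PySem.Dict.mk (pvInner l s)

lemma pv_foldl_match {β : Type} (g : β → String × String → β) :
    ∀ (data : List (List (String × String))) (init : β),
    data.foldl (fun m record =>
        match pvExtract record with
        | some p => g m p
        | none => m) init
      = (data.filterMap pvExtract).foldl g init := by
  intro data
  induction data with
  | nil => intro init; rfl
  | cons rec rest ih =>
    intro init
    simp only [List.foldl_cons, List.filterMap_cons]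
    cases h : pvExtract rec <;> simp [ih]

lemma pv_pairs_fold :
    ∀ (data : List (List (String × String))) (acc : List (String × String)),
    data.foldl (fun pairs record =>
        match pvExtract record with
        | some p => pairs ++ [p]
        | none => pairs) acc
      = acc ++ data.filterMap pvExtract := by
  intro data
  induction data with
  | nil => intro acc; simp
  | cons rec rest ih =>
    intro acc
    simp only [List.foldl_cons, List.filterMap_cons]
    cases h : pvExtract rec <;> simp [ih]

lemma pv_mem_innerSet (l : List (String × String)) (s r : String) :
    r ∈ PySem.Set.ofList ((l.filter (fun p => p.1 == s)).map Prod.snd) ↔ (s, r) ∈ l := by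
  rw [PySem.Set.mem_ofList]
  constructor
  · rintro h
    rcases List.mem_map.mp h with ⟨p, hp, rfl⟩
    rcases List.mem_filter.mp hp with ⟨hl, he⟩
    rcases p with ⟨a, b⟩
    have ha : a = s := by simpa using he
    subst ha
    exact hl
  · intro h
    exact List.mem_map.mpr ⟨(s, r), List.mem_filter.mpr ⟨h, by simp⟩, rfl⟩

lemma pv_keys_pvInnerD (l : List (String × String)) (s : String) :
    (pvInnerD l s).keys = PySem.Set.ofList ((l.filter (fun p => p.1 == s)).map Prod.snd) := by
  show List.map Prod.fst (List.map _ _) = _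
  rw [List.map_map]
  exact List.map_id _

lemma pv_getD_pvInnerD (l : List (String × String)) (s r : String) :
    (pvInnerD l s).getD r 0 = (l.count (s, r) : Int) := by
  by_cases hm : (s, r) ∈ l
  · refine PySem.Dict.getD_of_mem_items _ ?_ ?_ 0
    · exact List.mem_map.mpr ⟨r, (pv_mem_innerSet l s r).mpr hm, rfl⟩
    · rw [pv_keys_pvInnerD]; exact PySem.Set.nodup_ofList _
  · have h0 : l.count (s, r) = 0 := List.count_eq_zero.mpr hm
    rw [h0]
    refine PySem.Dict.getD_of_not_contains _ _ ?_
    rw [PySem.Dict.contains_eq_decide_mem_keys, pv_keys_pvInnerD]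
    simpa using hm

lemma pv_filter_fst_nil {l : List (String × String)} {s : String}
    (h : s ∉ l.map Prod.fst) : l.filter (fun p => p.1 == s) = [] := by
  refine List.filter_eq_nil_iff.mpr ?_
  intro p hp
  simp only [beq_iff_eq]
  intro he
  exact h (List.mem_map.mpr ⟨p, hp, he⟩)

lemma pv_pvInnerD_empty {l : List (String × String)} {s : String}
    (h : s ∉ l.map Prod.fst) : pvInnerD l s = PySem.Dict.empty := by
  unfold pvInnerD pvInner
  rw [pv_filter_fst_nil h]
  rfl

lemma pv_inner_append_ne {l : List (String × String)} {s₀ r₀ s : String} (h : s ≠ s₀) :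
    pvInner (l ++ [(s₀, r₀)]) s = pvInner l s := by
  unfold pvInner
  have hfil : (l ++ [(s₀, r₀)]).filter (fun p => p.1 == s) = l.filter (fun p => p.1 == s) := by
    rw [List.filter_append]
    simp [Ne.symm h]
  rw [hfil]
  refine List.map_congr_left ?_
  intro r _
  have : List.count (s, r) [(s₀, r₀)] = 0 := by
    simp [Prod.ext_iff, Ne.symm h]
  simp [List.count_append, this]

lemma pv_insert_pvInnerD (l : List (String × String)) (s₀ r₀ : String) :
    (pvInnerD l s₀).insert r₀ ((pvInnerD l s₀).getD r₀ 0 + 1) = pvInnerD (l ++ [(s₀, r₀)]) s₀ := by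
  apply PySem.Dict.ext
  rw [pv_getD_pvInnerD, PySem.Dict.items_insert]
  have hcont : (pvInnerD l s₀).contains r₀ = decide ((s₀, r₀) ∈ l) := by
    rw [PySem.Dict.contains_eq_decide_mem_keys, pv_keys_pvInnerD]
    simp [pv_mem_innerSet]
  have hfil : (l ++ [(s₀, r₀)]).filter (fun p => p.1 == s₀) = l.filter (fun p => p.1 == s₀) ++ [(s₀, r₀)] := by
    rw [List.filter_append]; simp
  have hcnt : ∀ r : String, List.count (s₀, r) (l ++ [(s₀, r₀)])
      = List.count (s₀, r) l + (if r = r₀ then 1 else 0) := by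
    intro r
    rw [List.count_append]
    by_cases hr : r = r₀ <;> simp [hr, Prod.ext_iff, Ne.symm]
  by_cases hmem : (s₀, r₀) ∈ l
  · rw [hcont]
    simp only [hmem, decide_true, if_true]
    show (List.map _ (pvInner l s₀)) = pvInner (l ++ [(s₀, r₀)]) s₀
    unfold pvInner
    rw [hfil]
    simp only [List.map_append, List.map_cons, List.map_nil, PySem.Set.ofList_append,
      PySem.Set.update_cons, PySem.Set.update_nil]
    rw [PySem.Set.add_of_mem ((pv_mem_innerSet l s₀ r₀).mpr hmem), List.map_map]
    refine List.map_congr_left ?_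
    intro r _
    by_cases hr : r = r₀ <;> simp [hr, hcnt, Function.comp]
  · rw [hcont]
    simp only [hmem, decide_false, Bool.false_eq_true, if_false]
    show pvInner l s₀ ++ [(r₀, (List.count (s₀, r₀) l : Int) + 1)] = pvInner (l ++ [(s₀, r₀)]) s₀
    unfold pvInner
    rw [hfil]
    simp only [List.map_append, List.map_cons, List.map_nil, PySem.Set.ofList_append,
      PySem.Set.update_cons, PySem.Set.update_nil]
    rw [PySem.Set.add_of_not_mem (by simpa [pv_mem_innerSet] using hmem), List.map_append]
    congr 1
    · refine List.map_congr_left ?_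
      intro r hrs
      have hr : r ≠ r₀ := by
        intro he; exact hmem ((pv_mem_innerSet l s₀ r₀).mp (he ▸ hrs))
      simp [hcnt, hr]
    · have : List.count (s₀, r₀) l = 0 := List.count_eq_zero.mpr hmem
      simp [hcnt, this]

-- keys of a dict whose items are a keyed map
lemma pv_keys_of_items {ν : Type} (d : PySem.Dict String ν) (ks : List String) (v : String → ν)
    (h : d.items = ks.map (fun s => (s, v s))) : d.keys = ks := by
  show List.map Prod.fst d.items = ks
  rw [h, List.map_map]
  exact List.map_id _

-- A-side main invariant
lemma pv_HA (l : List (String × String)) :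
    (l.foldl pvStepA PySem.Dict.empty).items
      = (PySem.Set.ofList (l.map Prod.fst)).map (fun s => (s, pvInnerD l s)) := by
  induction l using List.reverseRecOn with
  | nil => rfl
  | append_singleton l p ih =>
    rcases p with ⟨s₀, r₀⟩
    rw [List.foldl_append, List.foldl_cons, List.foldl_nil]
    have hkeys : (l.foldl pvStepA PySem.Dict.empty).keys = PySem.Set.ofList (l.map Prod.fst) :=
      pv_keys_of_items _ _ _ ih
    have hnd : (l.foldl pvStepA PySem.Dict.empty).keys.Nodup := by
      rw [hkeys]; exact PySem.Set.nodup_ofList _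
    have hcont : (l.foldl pvStepA PySem.Dict.empty).contains s₀ = decide (s₀ ∈ l.map Prod.fst) := by
      rw [PySem.Dict.contains_eq_decide_mem_keys, hkeys]
      simp [PySem.Set.mem_ofList]
    have hgetD : (l.foldl pvStepA PySem.Dict.empty).getD s₀ PySem.Dict.empty = pvInnerD l s₀ := by
      by_cases hm : s₀ ∈ l.map Prod.fst
      · refine PySem.Dict.getD_of_mem_items _ ?_ hnd _
        rw [ih]
        exact List.mem_map.mpr ⟨s₀, (PySem.Set.mem_ofList _ _).mpr hm, rfl⟩
      · rw [PySem.Dict.getD_of_not_contains _ _ (by simp [hcont, hm]), pv_pvInnerD_empty hm]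
    show (PySem.Dict.modify _ s₀ PySem.Dict.empty (fun inner => inner.modify r₀ 0 (· + 1))).items = _
    rw [PySem.Dict.modify, hgetD, PySem.Dict.modify, pv_insert_pvInnerD, PySem.Dict.items_insert]
    simp only [List.map_append, List.map_cons, List.map_nil, PySem.Set.ofList_append,
      PySem.Set.update_cons, PySem.Set.update_nil]
    by_cases hm : s₀ ∈ l.map Prod.fst
    · rw [hcont]
      simp only [hm, decide_true, if_true]
      rw [PySem.Set.add_of_mem ((PySem.Set.mem_ofList _ _).mpr hm), ih, List.map_map]
      refine List.map_congr_left ?_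
      intro s _
      by_cases hs : s = s₀
      · simp [hs, Function.comp]
      · simp only [Function.comp_apply]
        rw [if_neg (by simpa using hs)]
        have : pvInnerD (l ++ [(s₀, r₀)]) s = pvInnerD l s := by
          unfold pvInnerD; rw [pv_inner_append_ne hs]
        rw [this]
    · rw [hcont]
      simp only [hm, decide_false, Bool.false_eq_true, if_false]
      rw [PySem.Set.add_of_not_mem (by simpa [PySem.Set.mem_ofList] using hm), ih, List.map_append,
        List.map_cons, List.map_nil]
      congr 1
      refine List.map_congr_left ?_
      intro s hs
      have hsne : s ≠ s₀ := by
        intro he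
        exact hm (he ▸ (PySem.Set.mem_ofList _ _).mp hs)
      have : pvInnerD (l ++ [(s₀, r₀)]) s = pvInnerD l s := by
        unfold pvInnerD; rw [pv_inner_append_ne hsne]
      rw [this]

-- B-side: a fold of inserts whose value is a function of the key
lemma pv_B1 {α ν : Type} (l : List α) (k : α → String) (v : String → ν) :
    (l.foldl (fun (d : PySem.Dict String ν) x => d.insert (k x) (v (k x))) PySem.Dict.empty).items
      = (PySem.Set.ofList (l.map k)).map (fun s => (s, v s)) := by
  induction l using List.reverseRecOn with
  | nil => rfl
  | append_singleton l x ih =>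
    rw [List.foldl_append, List.foldl_cons, List.foldl_nil, PySem.Dict.items_insert]
    simp only [List.map_append, List.map_cons, List.map_nil, PySem.Set.ofList_append,
      PySem.Set.update_cons, PySem.Set.update_nil]
    have hkeys := pv_keys_of_items _ _ _ ih
    have hcont : (l.foldl (fun (d : PySem.Dict String ν) x => d.insert (k x) (v (k x))) PySem.Dict.empty).contains (k x)
        = decide (k x ∈ PySem.Set.ofList (l.map k)) := by
      rw [PySem.Dict.contains_eq_decide_mem_keys, hkeys]
    by_cases hm : k x ∈ PySem.Set.ofList (l.map k)
    · rw [hcont]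
      simp only [hm, decide_true, if_true]
      rw [PySem.Set.add_of_mem hm, ih, List.map_map]
      refine List.map_congr_left ?_
      intro s _
      by_cases hs : s = k x <;> simp [hs, Function.comp]
    · rw [hcont]
      simp only [hm, decide_false, Bool.false_eq_true, if_false, List.map_cons, List.map_nil]
      rw [PySem.Set.add_of_not_mem hm, ih, List.map_append, List.map_cons, List.map_nil]

-- B's inner comprehension equals the canonical inner dict
lemma pv_innerV (l : List (String × String)) (s : String) :
    ((l.filter (fun q => q.1 == s)).foldl
        (fun (inner : PySem.Dict String Int) q =>
          inner.insert q.2 ((l.count (q.1, q.2) : Int))) PySem.Dict.empty)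
      = pvInnerD l s := by
  apply PySem.Dict.ext
  rw [PySem.List.foldl_congr_mem _ _
      (fun (inner : PySem.Dict String Int) q =>
        inner.insert (Prod.snd q) ((fun r => (l.count (s, r) : Int)) (Prod.snd q))) _
      (by
        intro acc q hq
        have hq1 : q.1 = s := by simpa using (List.mem_filter.mp hq).2
        show _ = PySem.Dict.insert _ q.2 ((l.count (s, q.2) : Int))
        rw [hq1])]
  rw [pv_B1 (l.filter (fun q => q.1 == s)) Prod.snd (fun r => (l.count (s, r) : Int))]
  rfl

-- reduce port A to the canonical form
lemma pv_portA (data : List (List (String × String))) :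
    extract_stand_runway_mapping data
      = ((data.filterMap pvExtract).foldl pvStepA PySem.Dict.empty).items.map
          (fun kv => (kv.1, kv.2.items)) := by
  unfold extract_stand_runway_mapping
  have hf : (fun (mapping : PySem.Dict String (PySem.Dict String Int)) record =>
      match (PySem.Dict.mk record).get? "stand", (PySem.Dict.mk record).get? "runway" with
      | some stand, some runway =>
          if stand ≠ "" ∧ runway ≠ "" then
            mapping.modify stand PySem.Dict.empty (fun inner => inner.modify runway 0 (· + 1))
          else mapping
      | _, _ => mapping)
      = (fun (m : PySem.Dict String (PySem.Dict String Int)) record =>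
          match pvExtract record with
          | some p => pvStepA m p
          | none => m) := by
    funext m record
    unfold pvExtract
    rcases h1 : (PySem.Dict.mk record).get? "stand" with _ | s <;>
      rcases h2 : (PySem.Dict.mk record).get? "runway" with _ | r <;> simp
    split <;> simp [pvStepA]
  rw [hf, pv_foldl_match]

-- reduce port B to the canonical form
lemma pv_portB (data : List (List (String × String))) :
    extract_stand_runway_mapping_alt data
      = ((data.filterMap pvExtract).foldl
          (fun (result : PySem.Dict String (PySem.Dict String Int)) p =>
            result.insert p.1
              (((data.filterMap pvExtract).filter (fun q => q.1 == p.1)).foldl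
                (fun (inner : PySem.Dict String Int) q =>
                  inner.insert q.2 (((data.filterMap pvExtract).count (q.1, q.2) : Int)))
                PySem.Dict.empty))
          PySem.Dict.empty).items.map (fun kv => (kv.1, kv.2.items)) := by
  unfold extract_stand_runway_mapping_alt
  have hf : (fun (pairs : List (String × String)) record =>
      match (PySem.Dict.mk record).get? "stand" with
      | none => pairs
      | some stand =>
        match (PySem.Dict.mk record).get? "runway" with
        | none => pairs
        | some runway =>
          if stand ≠ "" ∧ runway ≠ "" then pairs ++ [(stand, runway)] else pairs)
      = (fun (pairs : List (String × String)) record =>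
          match pvExtract record with
          | some p => pairs ++ [p]
          | none => pairs) := by
    funext pairs record
    unfold pvExtract
    rcases h1 : (PySem.Dict.mk record).get? "stand" with _ | s <;>
      rcases h2 : (PySem.Dict.mk record).get? "runway" with _ | r <;> simp
    split <;> simp
  rw [hf, pv_pairs_fold]
  simp

-- ===== VERDICT (by name: the statement is the Claim_ definition above) =====
theorem extract_stand_runway_mapping_spec : Claim_equal_extract_stand_runway_mapping := by
  intro data _
  unfold Spec_extract_stand_runway_mapping
  rw [pv_portA, pv_portB]
  set l := data.filterMap pvExtract with hl
  rw [pv_HA]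
  have houter : (l.foldl
      (fun (result : PySem.Dict String (PySem.Dict String Int)) p =>
        result.insert p.1
          ((l.filter (fun q => q.1 == p.1)).foldl
            (fun (inner : PySem.Dict String Int) q =>
              inner.insert q.2 ((l.count (q.1, q.2) : Int))) PySem.Dict.empty))
      PySem.Dict.empty).items
      = (PySem.Set.ofList (l.map Prod.fst)).map (fun s => (s, pvInnerD l s)) := by
    rw [show (fun (result : PySem.Dict String (PySem.Dict String Int)) (p : String × String) =>
          result.insert p.1
            ((l.filter (fun q => q.1 == p.1)).foldl
              (fun (inner : PySem.Dict String Int) q =>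
                inner.insert q.2 ((l.count (q.1, q.2) : Int))) PySem.Dict.empty))
        = (fun (result : PySem.Dict String (PySem.Dict String Int)) (p : String × String) =>
            result.insert (Prod.fst p)
              ((fun s => (l.filter (fun q => q.1 == s)).foldl
                (fun (inner : PySem.Dict String Int) q =>
                  inner.insert q.2 ((l.count (q.1, q.2) : Int))) PySem.Dict.empty) (Prod.fst p))) from rfl,
      pv_B1 l Prod.fst
        (fun s => (l.filter (fun q => q.1 == s)).foldl
          (fun (inner : PySem.Dict String Int) q =>
            inner.insert q.2 ((l.count (q.1, q.2) : Int))) PySem.Dict.empty)]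
    refine List.map_congr_left ?_
    intro s _
    rw [pv_innerV]
  rw [houter]
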